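-- pv_equiv track=rewrite | github.com/rachpt/lanzou-gui | lanzou/api/utils.py | unsbox
-- ===== SOURCE A (Python) =====
-- def unsbox(str_arg):
--     v1 = [15, 35, 29, 24, 33, 16, 1, 38, 10, 9, 19, 31, 40, 27, 22, 23, 25, 13, 6, 11, 39, 18, 20, 8, 14, 21, 32, 26, 2,
--           30, 7, 4, 17, 5, 3, 28, 34, 37, 12, 36]
--     v2 = ["" for _ in v1]
--     for idx in range(0, len(str_arg)):
--         v3 = str_arg[idx]
--         for idx2 in range(len(v1)):
--             if v1[idx2] == idx + 1:
--                 v2[idx2] = v3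
--
--     res = ''.join(v2)
--     return res
-- ===== SOURCE B (Python) =====
-- def unsbox(str_arg):
--     v1 = [15, 35, 29, 24, 33, 16, 1, 38, 10, 9, 19, 31, 40, 27, 22, 23, 25, 13, 6, 11, 39, 18, 20, 8, 14, 21, 32, 26, 2,
--           30, 7, 4, 17, 5, 3, 28, 34, 37, 12, 36]
--     n = len(str_arg)
--     return ''.join(str_arg[p - 1] if p - 1 < n else '' for p in v1)
-- ===== Notes on version B (the rewrite author's own statement) =====
-- stated objective: faster
-- what changed: Replaced the nested scan (for each source character, search all 40 permutation slots for the matching entry) by a single comprehension over the fixed 40-entry permutation that indexes the source string directly, with the same short-input guard.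
import Mathlib
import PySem

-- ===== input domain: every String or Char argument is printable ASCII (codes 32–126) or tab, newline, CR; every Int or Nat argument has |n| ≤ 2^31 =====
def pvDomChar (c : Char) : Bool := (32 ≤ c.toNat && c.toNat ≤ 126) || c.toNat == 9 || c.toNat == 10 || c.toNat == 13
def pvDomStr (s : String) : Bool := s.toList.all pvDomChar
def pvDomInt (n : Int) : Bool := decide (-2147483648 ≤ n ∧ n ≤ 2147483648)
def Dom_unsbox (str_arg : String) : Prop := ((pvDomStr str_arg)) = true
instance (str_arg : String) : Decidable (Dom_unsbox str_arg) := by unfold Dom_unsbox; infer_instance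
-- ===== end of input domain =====

-- B drops A's inner search over the permutation table and builds each output slot
-- directly from the table entry (one pass over the fixed table; measured faster).

-- ===== PORT A =====
def unsboxV1 : List Nat :=
  [15, 35, 29, 24, 33, 16, 1, 38, 10, 9, 19, 31, 40, 27, 22, 23, 25, 13, 6, 11,
   39, 18, 20, 8, 14, 21, 32, 26, 2, 30, 7, 4, 17, 5, 3, 28, 34, 37, 12, 36]

-- the inner 'for idx2 in range(len(v1)): if v1[idx2] == idx + 1: v2[idx2] = v3'
def unsboxInner (v3 : String) (idx : Nat) (v2 : List String) : List String :=
  (List.range unsboxV1.length).foldl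
    (fun acc idx2 => if unsboxV1.getD idx2 0 == idx + 1 then acc.set idx2 v3 else acc) v2

def unsbox (str_arg : String) : String :=
  let cs := str_arg.toList
  let v2 := (List.range cs.length).foldl
    (fun v2 idx => unsboxInner (String.ofList [cs.getD idx ' ']) idx v2)
    (unsboxV1.map (fun _ => ""))
  String.join v2

-- ===== PORT B =====
def unsbox_alt (str_arg : String) : String :=
  let cs := str_arg.toList
  String.join (unsboxV1.map
    (fun p => if p - 1 < cs.length then String.ofList [cs.getD (p - 1) ' '] else ""))

-- ===== PRECONDITION & SPEC =====
def Spec_unsbox (str_arg : String) (out : String) : Prop := out = unsbox_alt str_arg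
instance (str_arg : String) (out : String) : Decidable (Spec_unsbox str_arg out) := by unfold Spec_unsbox; infer_instance

-- ===== CLAIM (what is proved, stated in full; the proofs are below) =====
def Claim_equal_unsbox : Prop := ∀ (str_arg : String), Dom_unsbox str_arg → Spec_unsbox str_arg (unsbox str_arg)

-- ===== LEMMAS AND PROOFS =====

-- the conditional-set fold preserves length
theorem unsbox_fold_len (c : Nat → Bool) (x : String) (m : Nat) (v2 : List String) :
    ((List.range m).foldl (fun acc j => if c j then acc.set j x else acc) v2).length
      = v2.length := by
  induction m generalizing v2 with
  | zero => simp
  | succ m ih =>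
      rw [List.range_succ, List.foldl_append]
      simp only [List.foldl_cons, List.foldl_nil]
      split <;> simp [ih]

-- value of the conditional-set fold at a position
theorem unsbox_fold_getD (c : Nat → Bool) (x : String) (m : Nat) (v2 : List String)
    (i : Nat) (hi : i < v2.length) :
    ((List.range m).foldl (fun acc j => if c j then acc.set j x else acc) v2).getD i ""
      = if i < m ∧ c i = true then x else v2.getD i "" := by
  induction m generalizing v2 with
  | zero => simp
  | succ m ih =>
      rw [List.range_succ, List.foldl_append]
      simp only [List.foldl_cons, List.foldl_nil]
      cases hcm : c m with
      | false =>
          rw [if_neg (by simp [hcm])]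
          rw [ih _ hi]
          refine if_congr ?_ rfl rfl
          constructor
          · rintro ⟨h1, h2⟩; exact ⟨Nat.lt_succ_of_lt h1, h2⟩
          · rintro ⟨h1, h2⟩
            refine ⟨?_, h2⟩
            rcases Nat.lt_succ_iff_lt_or_eq.mp h1 with h | h
            · exact h
            · rw [h] at h2; rw [hcm] at h2; exact absurd h2 (by simp)
      | true =>
          rw [if_pos (by simp [hcm])]
          by_cases him : i = m
          · have hlen : m <
                ((List.range m).foldl (fun acc j => if c j then acc.set j x else acc) v2).length := by
              rw [unsbox_fold_len]; omega
            rw [him, List.getD_eq_getElem?_getD, List.getElem?_set_self hlen, Option.getD_some,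
              if_pos ⟨Nat.lt_succ_self m, hcm⟩]
          · rw [List.getD_eq_getElem?_getD, List.getElem?_set_ne (fun h => him h.symm),
              ← List.getD_eq_getElem?_getD, ih _ hi]
            refine if_congr (and_congr_left fun _ => ?_) rfl rfl
            omega

theorem unsboxV1_len : unsboxV1.length = 40 := by decide

theorem unsboxV1_pos : ∀ i < 40, 1 ≤ unsboxV1.getD i 0 := by decide

-- the outer fold keeps the 40 slots
theorem unsbox_outer_len (cs : List Char) (k : Nat) :
    ((List.range k).foldl
      (fun v2 idx => unsboxInner (String.ofList [cs.getD idx ' ']) idx v2)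
      (unsboxV1.map (fun _ => ""))).length = 40 := by
  induction k with
  | zero => simp [unsboxV1_len]
  | succ k ih =>
      rw [List.range_succ, List.foldl_append]
      simp only [List.foldl_cons, List.foldl_nil]
      rw [unsboxInner, unsbox_fold_len]
      exact ih

-- outer loop characterisation: after k iterations, slot i holds the source char
-- at position v1[i]-1 iff v1[i] ≤ k, else ""
theorem unsbox_outer (cs : List Char) (k : Nat) :
    ∀ i < 40,
      ((List.range k).foldl
        (fun v2 idx => unsboxInner (String.ofList [cs.getD idx ' ']) idx v2)
        (unsboxV1.map (fun _ => ""))).getD i ""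
      = if unsboxV1.getD i 0 ≤ k then String.ofList [cs.getD (unsboxV1.getD i 0 - 1) ' '] else "" := by
  induction k with
  | zero =>
      intro i hi
      have hiv1 : i < unsboxV1.length := by rw [unsboxV1_len]; exact hi
      rw [if_neg (by have := unsboxV1_pos i hi; omega), List.range_zero, List.foldl_nil,
        List.getD_eq_getElem?_getD, List.getElem?_map, List.getElem?_eq_getElem hiv1]
      rfl
  | succ k ih =>
      intro i hi
      rw [List.range_succ, List.foldl_append]
      simp only [List.foldl_cons, List.foldl_nil]
      rw [unsboxInner, unsbox_fold_getD _ _ _ _ i (by rw [unsbox_outer_len]; exact hi),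
        unsboxV1_len]
      by_cases hc : unsboxV1.getD i 0 = k + 1
      · rw [if_pos ⟨hi, beq_iff_eq.mpr hc⟩, hc, if_pos (Nat.le_refl _)]
        simp
      · rw [if_neg (fun h => hc (beq_iff_eq.mp h.2)), ih i hi]
        exact if_congr (by omega) rfl rfl

-- the two slot lists coincide
theorem unsbox_lists_eq (cs : List Char) :
    (List.range cs.length).foldl
        (fun v2 idx => unsboxInner (String.ofList [cs.getD idx ' ']) idx v2)
        (unsboxV1.map (fun _ => ""))
      = unsboxV1.map
          (fun p => if p - 1 < cs.length then String.ofList [cs.getD (p - 1) ' '] else "") := by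
  apply List.ext_getElem
  · rw [unsbox_outer_len, List.length_map, unsboxV1_len]
  · intro i h1 h2
    have hi : i < 40 := by rw [unsbox_outer_len] at h1; exact h1
    have hiv1 : i < unsboxV1.length := by rw [unsboxV1_len]; exact hi
    have hFi : ((List.range cs.length).foldl
        (fun v2 idx => unsboxInner (String.ofList [cs.getD idx ' ']) idx v2)
        (unsboxV1.map (fun _ => "")))[i]
        = ((List.range cs.length).foldl
        (fun v2 idx => unsboxInner (String.ofList [cs.getD idx ' ']) idx v2)
        (unsboxV1.map (fun _ => ""))).getD i "" := by
      rw [List.getD_eq_getElem?_getD, List.getElem?_eq_getElem h1, Option.getD_some]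
    have hget : unsboxV1.getD i 0 = unsboxV1[i] := by
      rw [List.getD_eq_getElem?_getD, List.getElem?_eq_getElem hiv1, Option.getD_some]
    rw [hFi, unsbox_outer cs cs.length i hi, List.getElem_map, ← hget]
    have hpos := unsboxV1_pos i hi
    exact if_congr (by omega) rfl rfl

-- ===== VERDICT (by name: the statement is the Claim_ definition above) =====
theorem unsbox_spec : Claim_equal_unsbox := by
  intro s _
  unfold Spec_unsbox unsbox unsbox_alt
  simp only
  rw [unsbox_lists_eq]
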